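-- pv_equiv track=rewrite | github.com/bcharris9/sdgfqaef | pipeline/test_lora_model.py | prerule_fault_type
-- ===== SOURCE A (Python) =====
-- def prerule_fault_type(input_text: str) -> str | None:
--     text = (input_text or "").strip()
--     if not text:
--         return None
--
--     # This signature is unambiguous in the current data: no parsed measurements.
--     # It consistently maps to a missing-component class.
--     has_measured_none = False
--     has_delta_none = False
--     sim_success_false = False
--     for line in text.splitlines():
--         s = line.strip()
--         low = s.lower()
--         if low == "measured: none":
--             has_measured_none = True
--         elif low == "deltasvsgolden: none":
--             has_delta_none = True
--         elif low == "simsuccess: false":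
--             sim_success_false = True
--
--     if has_measured_none and (has_delta_none or sim_success_false):
--         return "missing_component"
--     return None
-- ===== SOURCE B (Python) =====
-- def prerule_fault_type(input_text: str) -> str | None:
--     text = (input_text or "").strip()
--     if not text:
--         return None
--     return _scan(text.splitlines(), False, False)
--
--
-- def _scan(lines: list[str], measured: bool, other: bool) -> str | None:
--     # Short-circuiting recursive scanner: stop as soon as the verdict is decided.
--     if measured and other:
--         return "missing_component"
--     if not lines:
--         return None
--     low = lines[0].strip().lower()
--     return _scan(
--         lines[1:],
--         measured or low == "measured: none",
--         other or low == "deltasvsgolden: none" or low == "simsuccess: false",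
--     )
-- ===== Notes on version B (the rewrite author's own statement) =====
-- stated objective: alternative
-- what changed: Replaces the full-pass loop over three boolean flags with a short-circuiting recursive scanner over the line list carrying two accumulators (measured, other) that returns as soon as both signals are present.
import Mathlib
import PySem

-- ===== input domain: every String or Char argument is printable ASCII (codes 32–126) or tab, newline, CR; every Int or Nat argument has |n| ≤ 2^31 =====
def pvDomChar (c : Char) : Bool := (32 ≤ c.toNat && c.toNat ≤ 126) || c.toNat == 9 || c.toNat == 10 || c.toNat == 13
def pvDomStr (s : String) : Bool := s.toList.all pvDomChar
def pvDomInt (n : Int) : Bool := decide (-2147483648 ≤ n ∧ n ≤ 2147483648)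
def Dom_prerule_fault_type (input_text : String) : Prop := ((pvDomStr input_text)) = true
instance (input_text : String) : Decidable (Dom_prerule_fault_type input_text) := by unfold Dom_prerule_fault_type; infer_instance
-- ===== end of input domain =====

-- B replaces A's full-pass loop over three flags with a short-circuiting recursive
-- scanner carrying two accumulators, returning as soon as the verdict is decided
-- (objective: alternative).

-- ===== PORT A =====
-- literal transliteration: strip, empty guard, a fold maintaining the three flags in order
def prerule_fault_type (input_text : String) : Option String :=
  let text := PySem.Str.strip input_text
  if text = "" then none
  else
    let fl := (PySem.Str.splitlines text).foldl
      (fun (fl : Bool × Bool × Bool) line =>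
        let low := PySem.Str.lower (PySem.Str.strip line)
        if low = "measured: none" then (true, fl.2.1, fl.2.2)
        else if low = "deltasvsgolden: none" then (fl.1, true, fl.2.2)
        else if low = "simsuccess: false" then (fl.1, fl.2.1, true)
        else fl)
      (false, false, false)
    if fl.1 && (fl.2.1 || fl.2.2) then some "missing_component" else none

-- ===== PORT B =====
-- _scan: recursion on the line list (Python's lines[1:] is the tail), two Bool accumulators,
-- early return once both signals are present
def pvScan : List String → Bool → Bool → Option String
  | lines, measured, other =>
    if measured && other then some "missing_component"
    else
      match lines with
      | [] => none
      | l :: rest =>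
        let low := PySem.Str.lower (PySem.Str.strip l)
        pvScan rest (measured || (low == "measured: none"))
          (other || ((low == "deltasvsgolden: none") || (low == "simsuccess: false")))

def prerule_fault_type_alt (input_text : String) : Option String :=
  let text := PySem.Str.strip input_text
  if text = "" then none
  else pvScan (PySem.Str.splitlines text) false false

-- ===== PRECONDITION & SPEC =====
def Spec_prerule_fault_type (input_text : String) (out : Option String) : Prop := out = prerule_fault_type_alt input_text
instance (input_text : String) (out : Option String) : Decidable (Spec_prerule_fault_type input_text out) := by unfold Spec_prerule_fault_type; infer_instance

-- ===== CLAIM (what is proved, stated in full; the proofs are below) =====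
def Claim_equal_prerule_fault_type : Prop := ∀ (input_text : String), Dom_prerule_fault_type input_text → Spec_prerule_fault_type input_text (prerule_fault_type input_text)

-- ===== LEMMAS AND PROOFS =====

-- abbreviations for the three per-line tests on the normalized line
def pvIsM (l : String) : Bool := PySem.Str.lower (PySem.Str.strip l) == "measured: none"
def pvIsD (l : String) : Bool := PySem.Str.lower (PySem.Str.strip l) == "deltasvsgolden: none"
def pvIsS (l : String) : Bool := PySem.Str.lower (PySem.Str.strip l) == "simsuccess: false"

-- B's short-circuiting scan computes the same condition as "does some line match".
theorem pvScan_eq (ls : List String) (m o : Bool) :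
    pvScan ls m o =
      (if (m || ls.any pvIsM) && (o || ls.any (fun l => pvIsD l || pvIsS l))
       then some "missing_component" else none) := by
  induction ls generalizing m o with
  | nil => simp [pvScan]
  | cons a t ih =>
    rw [pvScan]
    by_cases hm : m = true <;> by_cases ho : o = true <;>
      simp [hm, ho, ih, pvIsM, pvIsD, pvIsS, Bool.or_assoc, Bool.or_comm, Bool.or_left_comm]

-- a string literal compared (==) against a lowered line known to differ gives false
theorem pv_beq_false_of_ne {x y : String} (h : ¬ y = x) : (y == x) = false :=
  beq_eq_false_iff_ne.mpr h

-- A's flag-scanning fold computes exactly the three "does some line match" tests.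
theorem fold_flags (ls : List String) (fl : Bool × Bool × Bool) :
    ls.foldl
      (fun (fl : Bool × Bool × Bool) line =>
        let low := PySem.Str.lower (PySem.Str.strip line)
        if low = "measured: none" then (true, fl.2.1, fl.2.2)
        else if low = "deltasvsgolden: none" then (fl.1, true, fl.2.2)
        else if low = "simsuccess: false" then (fl.1, fl.2.1, true)
        else fl)
      fl
    = (fl.1 || ls.any pvIsM, fl.2.1 || ls.any pvIsD, fl.2.2 || ls.any pvIsS) := by
  induction ls generalizing fl with
  | nil => simp
  | cons a t ih =>
    simp only [List.foldl_cons, List.any_cons]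
    split_ifs with h1 h2 h3
    · rw [ih]; simp [pvIsM, pvIsD, pvIsS, h1, pv_beq_false_of_ne]
    · rw [ih]; simp [pvIsM, pvIsD, pvIsS, h2, pv_beq_false_of_ne h1]
    · rw [ih]; simp [pvIsM, pvIsD, pvIsS, h3, pv_beq_false_of_ne h1, pv_beq_false_of_ne h2]
    · rw [ih]
      simp [pvIsM, pvIsD, pvIsS, pv_beq_false_of_ne h1, pv_beq_false_of_ne h2, pv_beq_false_of_ne h3]

-- any distributes over || of the per-line tests
theorem any_or (ls : List String) :
    ls.any (fun l => pvIsD l || pvIsS l) = (ls.any pvIsD || ls.any pvIsS) := by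
  induction ls with
  | nil => simp
  | cons a t ih => simp [ih, Bool.or_assoc, Bool.or_comm, Bool.or_left_comm]

-- ===== VERDICT (by name: the statement is the Claim_ definition above) =====
theorem prerule_fault_type_spec : Claim_equal_prerule_fault_type := by
  intro input_text _
  unfold Spec_prerule_fault_type prerule_fault_type prerule_fault_type_alt
  by_cases h : PySem.Str.strip input_text = ""
  · rw [if_pos h, if_pos h]
  · rw [if_neg h, if_neg h]
    rw [fold_flags, pvScan_eq, any_or]
    simp
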